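-- pv_equiv track=rewrite | github.com/a1029/algorithm | ndb/search/연구소.py | search
-- ===== SOURCE A (Python) =====
-- import itertools
--
-- def search(n, m, data):
--     def dfs(i, j):
--
--         if i < 0 or i >= len(data) or j < 0 or j >= len(data[0]) or data[i][j] == 1 or data[i][j] == 3:
--             return
--         data[i][j] = 3
--
--         dfs(i, j + 1)
--         dfs(i, j - 1, )
--         dfs(i + 1, j)
--         dfs(i - 1, j)
--
--     for i in range(n):
--         for j in range(m):
--             if data[i][j] == 2:
--                 dfs(i, j)
--
--     data = list(itertools.chain.from_iterable(data))
--     result = data.count(0)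
--     return result
-- ===== SOURCE B (Python) =====
-- def search(n, m, data):
--     # Iterative flood fill with an explicit stack instead of recursive dfs.
--     # Mutates data in place exactly like A (every reachable cell becomes 3).
--     stack = [(i, j) for i in range(n) for j in range(m) if data[i][j] == 2]
--     stack.reverse()
--     while stack:
--         i, j = stack.pop()
--         if i < 0 or i >= len(data) or j < 0 or j >= len(data[0]) or data[i][j] == 1 or data[i][j] == 3:
--             continue
--         data[i][j] = 3
--         stack.extend([(i - 1, j), (i + 1, j), (i, j - 1), (i, j + 1)])
--     return sum(row.count(0) for row in data)
-- ===== Notes on version B (the rewrite author's own statement) =====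
-- stated objective: idiomatic
-- what changed: A's recursive dfs (one Python call frame per cell, risking RecursionError on large regions) is replaced by an iterative flood fill over an explicit stack seeded with all virus cells in one scan, and the final count is a sum of per-row counts instead of flattening the grid.
-- outside the precondition, e.g. on search(1, 1, [[0], [5, 6]]): A returns 1, B returns 1; on search(2, 1, [[2, 0], [0]]): A raises IndexError, B raises IndexError
import Mathlib
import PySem

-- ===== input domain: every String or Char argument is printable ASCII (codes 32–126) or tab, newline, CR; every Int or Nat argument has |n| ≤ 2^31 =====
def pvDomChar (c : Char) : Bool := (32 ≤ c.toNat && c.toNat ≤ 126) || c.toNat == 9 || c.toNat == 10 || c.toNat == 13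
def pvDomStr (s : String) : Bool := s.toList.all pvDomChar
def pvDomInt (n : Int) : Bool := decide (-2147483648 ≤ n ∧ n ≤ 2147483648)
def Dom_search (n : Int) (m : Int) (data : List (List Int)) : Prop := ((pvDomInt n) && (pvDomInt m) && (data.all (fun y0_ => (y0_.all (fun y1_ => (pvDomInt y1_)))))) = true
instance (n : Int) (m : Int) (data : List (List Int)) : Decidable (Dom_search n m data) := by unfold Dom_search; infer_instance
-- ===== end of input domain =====

-- B replaces A's recursive dfs by an iterative flood fill with an explicit stack and a
-- per-row count (objective: idiomatic / no recursion-depth limit); return-value equivalence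
-- is what is proved, and B performs the same in-place flooding as A.

-- ===== PORT A =====
-- shared cell helpers (both Pythons read data[i][j], write data[i][j] = 3, and test the
-- same guard 'i < 0 or i >= len(data) or j < 0 or j >= len(data[0]) or cell == 1 or cell == 3')
-- the index accesses below are guarded in range (0 ≤ i < len(data), 0 ≤ j), so toNat+getD is exact
def pvGetc (g : List (List Int)) (i j : Int) : Int := (g.getD i.toNat []).getD j.toNat 0

def pvSetc (g : List (List Int)) (i j : Int) (v : Int) : List (List Int) :=
  g.set i.toNat ((g.getD i.toNat []).set j.toNat v)

def pvBad (g : List (List Int)) (i j : Int) : Bool :=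
  decide (i < 0) || decide ((g.length : Int) ≤ i) || decide (j < 0) ||
  decide (((g.headD []).length : Int) ≤ j) || (pvGetc g i j == 1) || (pvGetc g i j == 3)

-- A's recursive dfs; the Nat fuel is only a totality guard (it bounds the recursion depth,
-- which never exceeds the number of markable cells + 1 on the admitted inputs)
def pvDfs : Nat → List (List Int) → Int → Int → List (List Int)
  | 0, g, _, _ => g
  | f+1, g, i, j =>
    if pvBad g i j then g
    else
      let g1 := pvSetc g i j 3
      let g2 := pvDfs f g1 i (j+1)
      let g3 := pvDfs f g2 i (j-1)
      let g4 := pvDfs f g3 (i+1) j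
      pvDfs f g4 (i-1) j

def search (n : Int) (m : Int) (data : List (List Int)) : Int :=
  let F := data.length * (data.headD []).length + 1
  let gfin := (PySem.List.pyRange 0 n 1).foldl (fun g i =>
      (PySem.List.pyRange 0 m 1).foldl (fun g j =>
        if pvGetc g i j == 2 then pvDfs F g i j else g) g) data
  (gfin.flatten.count 0 : Int)

-- ===== PORT B =====
-- B's while-loop over the explicit stack; fuel is again only a totality guard (each
-- iteration pops one entry; pops are bounded by |stack| + 5·(number of cells))
def pvRun : Nat → List (List Int) → List (Int × Int) → List (List Int)
  | 0, g, _ => g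
  | _+1, g, [] => g
  | f+1, g, (i, j) :: rest =>
    if pvBad g i j then pvRun f g rest
    else pvRun f (pvSetc g i j 3) ((i, j+1) :: (i, j-1) :: (i+1, j) :: (i-1, j) :: rest)

def search_alt (n : Int) (m : Int) (data : List (List Int)) : Int :=
  let seeds := (PySem.List.pyRange 0 n 1).foldl (fun acc i =>
      (PySem.List.pyRange 0 m 1).foldl (fun acc j =>
        if pvGetc data i j == 2 then acc ++ [(i, j)] else acc) acc) []
  -- the Python stack is represented head-as-top (Python's list end = Lean's head);
  -- 'stack.reverse()' flips that representation back, so the machine starts on 'seeds'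
  let F := seeds.length + 5 * (data.length * (data.headD []).length) + 1
  let gfin := pvRun F data seeds
  (gfin.map (fun r => (r.count 0 : Int))).sum

-- ===== PRECONDITION & SPEC =====
-- Pre_ excludes inputs where A's scan raises IndexError (0 < n, 0 < m but n > len(data) or
-- m > len(data[0])) and, wholesale, non-rectangular grids reached by the scan: on those A's
-- bounds check uses row 0's length, so the flood raises IndexError whenever it reaches a
-- short row (rectangularity is the natural domain of this grid problem).
def Pre_search (n : Int) (m : Int) (data : List (List Int)) : Prop :=
  (n ≤ 0 ∨ m ≤ 0) ∨
  (n ≤ (data.length : Int) ∧ m ≤ ((data.headD []).length : Int) ∧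
   ∀ r ∈ data, r.length = (data.headD []).length)
instance (n : Int) (m : Int) (data : List (List Int)) : Decidable (Pre_search n m data) := by
  unfold Pre_search; infer_instance

def pvWitness_search : Int × Int × List (List Int) := (2, 2, [[2, 0], [1, 0]])

def Spec_search (n : Int) (m : Int) (data : List (List Int)) (out : Int) : Prop := out = search_alt n m data
instance (n : Int) (m : Int) (data : List (List Int)) (out : Int) : Decidable (Spec_search n m data out) := by unfold Spec_search; infer_instance

-- ===== CLAIM (what is proved, stated in full; the proofs are below) =====
def Claim_equal_search : Prop := ∀ (n : Int) (m : Int) (data : List (List Int)), Dom_search n m data → Pre_search n m data → Spec_search n m data (search n m data)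

-- ===== LEMMAS AND PROOFS =====

-- the shape (row lengths) of the grid, preserved by every write
def pvShape (g : List (List Int)) : List Nat := g.map List.length

def pvRect (g : List (List Int)) : Prop := ∀ x ∈ pvShape g, x = (pvShape g).headD 0

-- the termination measure: number of cells that are still markable (≠ 1 and ≠ 3)
def pvMark (v : Int) : Bool := !(v == 1) && !(v == 3)
def pvMu (g : List (List Int)) : Nat := (g.map (fun r => r.countP pvMark)).sum

-- generic list helpers
theorem pvSetSelf {α : Type} (l : List α) (k : Nat) (hk : k < l.length) :
    l.set k l[k] = l := List.set_getElem_self ..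

theorem pvCountP_set (p : Int → Bool) (l : List Int) (k : Nat) (x : Int) (h : k < l.length) :
    (l.set k x).countP p + (p l[k]).toNat = l.countP p + (p x).toNat := by
  induction l generalizing k with
  | nil => simp at h
  | cons a t ih =>
    cases k with
    | zero => by_cases hp : p a <;> by_cases hx : p x <;> simp [hp, hx]
    | succ k =>
      have := ih k (by simpa using h)
      simp only [List.set_cons_succ, List.countP_cons, List.getElem_cons_succ] at *
      omega

theorem pvSum_set (l : List Nat) (k : Nat) (x : Nat) (h : k < l.length) :
    (l.set k x).sum + l.getD k 0 = l.sum + x := by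
  induction l generalizing k with
  | nil => simp at h
  | cons a t ih =>
    cases k with
    | zero => simp [List.getD]; omega
    | succ k =>
      have := ih k (by simpa using h)
      simp only [List.set_cons_succ, List.sum_cons, List.getD_cons_succ] at *
      omega

theorem pvGetD_set_or {α : Type} (l : List α) (k n : Nat) (x d : α) :
    (l.set k x).getD n d = l.getD n d ∨ (n = k ∧ (l.set k x).getD n d = x) := by
  by_cases h : k = n
  · subst h
    by_cases h2 : k < l.length
    · exact Or.inr ⟨rfl, by simp [List.getD_eq_getElem?_getD, h2]⟩
    · exact Or.inl (by rw [List.set_eq_of_length_le (by omega)])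
  · exact Or.inl (by simp [List.getD_eq_getElem?_getD, List.getElem?_set_ne, h])

theorem pvW_shape (g : List (List Int)) : (g.headD []).length = (pvShape g).headD 0 := by
  cases g <;> simp [pvShape]

theorem pvShape_setc (g : List (List Int)) (i j : Int) (v : Int) :
    pvShape (pvSetc g i j v) = pvShape g := by
  unfold pvSetc pvShape
  by_cases hk : i.toNat < g.length
  · rw [List.map_set]
    have hv : ((g.getD i.toNat []).set j.toNat v).length
        = (g.map List.length)[i.toNat]'(by simpa) := by
      rw [List.length_set, List.getElem_map, List.getD_eq_getElem g [] hk]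
    rw [hv, pvSetSelf]
  · rw [List.set_eq_of_length_le (by omega)]

theorem pvShape_dfs (f : Nat) : ∀ (g : List (List Int)) (i j : Int),
    pvShape (pvDfs f g i j) = pvShape g := by
  induction f with
  | zero => intro g i j; rfl
  | succ f ih =>
    intro g i j
    by_cases hb : pvBad g i j
    · simp [pvDfs, hb]
    · simp only [pvDfs, hb, Bool.false_eq_true, if_false]
      rw [ih, ih, ih, ih, pvShape_setc]

theorem pvGetc_setc_or (g : List (List Int)) (i j a b : Int) (v : Int) :
    pvGetc (pvSetc g i j v) a b = pvGetc g a b ∨ pvGetc (pvSetc g i j v) a b = v := by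
  unfold pvGetc pvSetc
  rcases pvGetD_set_or g i.toNat a.toNat ((g.getD i.toNat []).set j.toNat v) [] with h | ⟨ha, h⟩
  · left; rw [h]
  · rw [h]
    rcases pvGetD_set_or (g.getD i.toNat []) j.toNat b.toNat v 0 with h2 | ⟨-, h2⟩
    · left; rw [h2, ha]
    · right; rw [h2]

theorem pvGetc_dfs_or (f : Nat) : ∀ (g : List (List Int)) (i j a b : Int),
    pvGetc (pvDfs f g i j) a b = pvGetc g a b ∨ pvGetc (pvDfs f g i j) a b = 3 := by
  induction f with
  | zero => intro g i j a b; left; rfl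
  | succ f ih =>
    intro g i j a b
    by_cases hb : pvBad g i j
    · simp [pvDfs, hb]
    · simp only [pvDfs, hb, Bool.false_eq_true, if_false]
      rcases ih _ (i-1) j a b with h5 | h5
      · rw [h5]
        rcases ih _ (i+1) j a b with h4 | h4
        · rw [h4]
          rcases ih _ i (j-1) a b with h3 | h3
          · rw [h3]
            rcases ih _ i (j+1) a b with h2 | h2
            · rw [h2]
              rcases pvGetc_setc_or g i j a b 3 with h1 | h1
              · left; rw [h1]
              · right; rw [h1]
            · right; rw [h2]
          · right; rw [h3]
        · right; rw [h4]
      · right; rw [h5]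

theorem pvMu_setc_le (g : List (List Int)) (i j : Int) :
    pvMu (pvSetc g i j 3) ≤ pvMu g := by
  unfold pvMu pvSetc
  by_cases hk : i.toNat < g.length
  · rw [List.map_set]
    have hs := pvSum_set (g.map (fun r => r.countP pvMark)) i.toNat
        (((g.getD i.toNat []).set j.toNat 3).countP pvMark) (by simpa)
    have hg : (g.map fun r => r.countP pvMark).getD i.toNat 0
        = (g.getD i.toNat []).countP pvMark := by
      rw [List.getD_eq_getElem _ _ (by simpa), List.getElem_map,
        List.getD_eq_getElem g [] hk]
    have hx : ((g.getD i.toNat []).set j.toNat 3).countP pvMark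
        ≤ (g.getD i.toNat []).countP pvMark := by
      by_cases hj : j.toNat < (g.getD i.toNat []).length
      · have hc := pvCountP_set pvMark (g.getD i.toNat []) j.toNat 3 hj
        rw [show pvMark 3 = false from rfl] at hc
        simp only [Bool.toNat_false] at hc
        omega
      · rw [List.set_eq_of_length_le (by omega)]
    omega
  · rw [List.set_eq_of_length_le (by omega)]

-- unpacking a passing guard
theorem pvBad_false (g : List (List Int)) (i j : Int) (h : pvBad g i j = false) :
    0 ≤ i ∧ i < (g.length : Int) ∧ 0 ≤ j ∧ j < ((g.headD []).length : Int) ∧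
    pvGetc g i j ≠ 1 ∧ pvGetc g i j ≠ 3 := by
  simp only [pvBad, Bool.or_eq_false_iff, decide_eq_false_iff_not, not_lt, not_le,
    beq_eq_false_iff_ne, ne_eq] at h
  exact ⟨h.1.1.1.1.1, h.1.1.1.1.2, h.1.1.1.2, h.1.1.2, h.1.2, h.2⟩

theorem pvMu_mark (g : List (List Int)) (i j : Int) (hR : pvRect g)
    (h : pvBad g i j = false) : pvMu (pvSetc g i j 3) < pvMu g := by
  obtain ⟨hi0, hiR, hj0, hjW, h1, h3⟩ := pvBad_false g i j h
  have hk : i.toNat < g.length := by omega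
  have hrowmem : (g.getD i.toNat []).length ∈ pvShape g := by
    rw [List.getD_eq_getElem g [] hk]
    exact List.mem_map_of_mem (List.getElem_mem hk)
  have hrowlen : (g.getD i.toNat []).length = (g.headD []).length := by
    rw [pvW_shape]; exact hR _ hrowmem
  have hj : j.toNat < (g.getD i.toNat []).length := by omega
  have hcell : (g.getD i.toNat [])[j.toNat] = pvGetc g i j := by
    rw [pvGetc, List.getD_eq_getElem _ _ hj]
  have hcp := pvCountP_set pvMark (g.getD i.toNat []) j.toNat 3 hj
  rw [hcell] at hcp
  have hmark : pvMark (pvGetc g i j) = true := by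
    simp [pvMark, h1, h3]
  rw [hmark, show pvMark 3 = false from rfl] at hcp
  simp only [Bool.toNat_true, Bool.toNat_false] at hcp
  unfold pvMu pvSetc
  rw [List.map_set]
  have hs := pvSum_set (g.map (fun r => r.countP pvMark)) i.toNat
      (((g.getD i.toNat []).set j.toNat 3).countP pvMark) (by simpa)
  have hg : (g.map fun r => r.countP pvMark).getD i.toNat 0
      = (g.getD i.toNat []).countP pvMark := by
    rw [List.getD_eq_getElem _ _ (by simpa), List.getElem_map, List.getD_eq_getElem g [] hk]
  omega

theorem pvMu_dfs_le (f : Nat) : ∀ (g : List (List Int)) (i j : Int),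
    pvMu (pvDfs f g i j) ≤ pvMu g := by
  induction f with
  | zero => intro g i j; exact le_refl _
  | succ f ih =>
    intro g i j
    by_cases hb : pvBad g i j
    · simp [pvDfs, hb]
    · simp only [pvDfs, hb, Bool.false_eq_true, if_false]
      calc pvMu (pvDfs f (pvDfs f (pvDfs f (pvDfs f (pvSetc g i j 3) i (j+1)) i (j-1)) (i+1) j) (i-1) j)
          ≤ pvMu (pvDfs f (pvDfs f (pvDfs f (pvSetc g i j 3) i (j+1)) i (j-1)) (i+1) j) := ih _ _ _
        _ ≤ pvMu (pvDfs f (pvDfs f (pvSetc g i j 3) i (j+1)) i (j-1)) := ih _ _ _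
        _ ≤ pvMu (pvDfs f (pvSetc g i j 3) i (j+1)) := ih _ _ _
        _ ≤ pvMu (pvSetc g i j 3) := ih _ _ _
        _ ≤ pvMu g := pvMu_setc_le g i j

theorem pvRect_of_shape {g g' : List (List Int)} (h : pvShape g' = pvShape g)
    (hR : pvRect g) : pvRect g' := by
  unfold pvRect
  rw [h]
  exact hR

theorem pvRun_nil (f : Nat) (g : List (List Int)) : pvRun f g [] = g := by
  cases f <;> rfl

theorem pvRun_fuel (f : Nat) : ∀ (g : List (List Int)) (st : List (Int × Int)) (f' : Nat),
    pvRect g → st.length + 5 * pvMu g ≤ f → st.length + 5 * pvMu g ≤ f' →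
    pvRun f g st = pvRun f' g st := by
  induction f with
  | zero =>
    intro g st f' _ h _
    have : st = [] := by cases st; rfl; simp at h
    rw [this, pvRun_nil, pvRun_nil]
  | succ f ih =>
    intro g st f' hR hf hf'
    cases st with
    | nil => rw [pvRun_nil, pvRun_nil]
    | cons p rest =>
      obtain ⟨i, j⟩ := p
      cases f' with
      | zero => simp at hf'
      | succ b =>
        by_cases hb : pvBad g i j
        · simp only [pvRun, hb, if_true]
          exact ih g rest b hR (by simp at hf ⊢; omega) (by simp at hf' ⊢; omega)
        · simp only [pvRun, hb, Bool.false_eq_true, if_false]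
          have hmu1 : pvMu (pvSetc g i j 3) < pvMu g := pvMu_mark g i j hR (by simpa using hb)
          have hR1 : pvRect (pvSetc g i j 3) := pvRect_of_shape (pvShape_setc g i j 3) hR
          exact ih _ _ b hR1 (by simp at hf ⊢; omega) (by simp at hf' ⊢; omega)

-- the simulation: popping (i,j) and running the stack machine performs exactly A's dfs
theorem pvSim (fA : Nat) : ∀ (g : List (List Int)) (i j : Int) (rest : List (Int × Int)) (fB fB' : Nat),
    pvRect g → pvMu g < fA →
    rest.length + 1 + 5 * pvMu g ≤ fB →
    rest.length + 5 * pvMu (pvDfs fA g i j) ≤ fB' →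
    pvRun fB g ((i, j) :: rest) = pvRun fB' (pvDfs fA g i j) rest := by
  induction fA with
  | zero => intro g i j rest fB fB' _ h _ _; omega
  | succ f ih =>
    intro g i j rest fB fB' hR hmu hB hB'
    cases fB with
    | zero => omega
    | succ c =>
      by_cases hb : pvBad g i j
      · have hd : pvDfs (f+1) g i j = g := by simp [pvDfs, hb]
        rw [hd] at hB' ⊢
        simp only [pvRun, hb, if_true]
        exact pvRun_fuel c g rest fB' hR (by omega) hB'
      · have hbf : pvBad g i j = false := by simpa using hb
        set g1 := pvSetc g i j 3 with hg1
        set g2 := pvDfs f g1 i (j+1) with hg2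
        set g3 := pvDfs f g2 i (j-1) with hg3
        set g4 := pvDfs f g3 (i+1) j with hg4
        set g5 := pvDfs f g4 (i-1) j with hg5
        have hd : pvDfs (f+1) g i j = g5 := by
          simp only [pvDfs, hbf, Bool.false_eq_true, if_false]
          rw [← hg1, ← hg2, ← hg3, ← hg4, ← hg5]
        have hmu1 : pvMu g1 < pvMu g := pvMu_mark g i j hR hbf
        have hR1 : pvRect g1 := pvRect_of_shape (pvShape_setc g i j 3) hR
        have hmu2 : pvMu g2 ≤ pvMu g1 := by rw [hg2]; exact pvMu_dfs_le f g1 i (j+1)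
        have hR2 : pvRect g2 := by rw [hg2]; exact pvRect_of_shape (pvShape_dfs f g1 i (j+1)) hR1
        have hmu3 : pvMu g3 ≤ pvMu g2 := by rw [hg3]; exact pvMu_dfs_le f g2 i (j-1)
        have hR3 : pvRect g3 := by rw [hg3]; exact pvRect_of_shape (pvShape_dfs f g2 i (j-1)) hR2
        have hmu4 : pvMu g4 ≤ pvMu g3 := by rw [hg4]; exact pvMu_dfs_le f g3 (i+1) j
        have hR4 : pvRect g4 := by rw [hg4]; exact pvRect_of_shape (pvShape_dfs f g3 (i+1) j) hR3
        have hmu5 : pvMu g5 ≤ pvMu g4 := by rw [hg5]; exact pvMu_dfs_le f g4 (i-1) j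
        have hR5 : pvRect g5 := by rw [hg5]; exact pvRect_of_shape (pvShape_dfs f g4 (i-1) j) hR4
        have hstep : pvRun (c+1) g ((i, j) :: rest)
            = pvRun c g1 ((i, j+1) :: (i, j-1) :: (i+1, j) :: (i-1, j) :: rest) := by
          simp only [pvRun, hbf, Bool.false_eq_true, if_false]
          rw [← hg1]
        rw [hstep, hd]
        have h1 := ih g1 i (j+1) ((i, j-1) :: (i+1, j) :: (i-1, j) :: rest) c
          ((rest.length + 3) + 5 * pvMu g2) hR1 (by omega) (by simp only [List.length_cons]; omega)
          (by rw [← hg2]; simp only [List.length_cons]; omega)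
        rw [← hg2] at h1
        have h2 := ih g2 i (j-1) ((i+1, j) :: (i-1, j) :: rest)
          ((rest.length + 3) + 5 * pvMu g2) ((rest.length + 2) + 5 * pvMu g3) hR2
          (by omega) (by simp only [List.length_cons]; omega) (by rw [← hg3]; simp only [List.length_cons]; omega)
        rw [← hg3] at h2
        have h3 := ih g3 (i+1) j ((i-1, j) :: rest)
          ((rest.length + 2) + 5 * pvMu g3) ((rest.length + 1) + 5 * pvMu g4) hR3
          (by omega) (by simp only [List.length_cons]; omega) (by rw [← hg4]; simp only [List.length_cons]; omega)
        rw [← hg4] at h3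
        have h4 := ih g4 (i-1) j rest
          ((rest.length + 1) + 5 * pvMu g4) (rest.length + 5 * pvMu g5) hR4
          (by omega) (by omega) (by rw [← hg5])
        rw [← hg5] at h4
        rw [h1, h2, h3, h4]
        apply pvRun_fuel _ _ _ _ hR5 (by omega)
        rw [hd] at hB'
        exact hB'

-- the per-seed step A's outer loops perform
def pvStep (FA : Nat) (g : List (List Int)) (p : Int × Int) : List (List Int) :=
  if pvGetc g p.1 p.2 == 2 then pvDfs FA g p.1 p.2 else g

-- running the stack machine on the seed list = folding A's step over the seed list
theorem pvRun_seeds (FA : Nat) : ∀ (L : List (Int × Int)) (g : List (List Int)) (fB : Nat),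
    pvRect g → pvMu g < FA →
    (∀ p ∈ L, 0 ≤ p.1 ∧ p.1 < (g.length : Int) ∧ 0 ≤ p.2 ∧
      p.2 < ((g.headD []).length : Int) ∧ (pvGetc g p.1 p.2 = 2 ∨ pvGetc g p.1 p.2 = 3)) →
    L.length + 5 * pvMu g ≤ fB →
    pvRun fB g L = L.foldl (pvStep FA) g := by
  intro L
  induction L with
  | nil => intro g fB _ _ _ _; rw [pvRun_nil]; rfl
  | cons p L' ih =>
    intro g fB hR hmu hmem hB
    obtain ⟨i, j⟩ := p
    obtain ⟨hi0, hiR, hj0, hjW, hval⟩ := hmem (i, j) (List.mem_cons_self ..)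
    cases fB with
    | zero => simp at hB
    | succ c =>
      rcases hval with h2 | h3
      · -- a live virus cell: the machine performs exactly A's dfs
        have hbf : pvBad g i j = false := by
          simp only [pvBad, Bool.or_eq_false_iff, decide_eq_false_iff_not, not_lt, not_le,
            beq_eq_false_iff_ne, ne_eq, h2]
          refine ⟨⟨⟨⟨⟨by omega, by omega⟩, by omega⟩, by omega⟩, by omega⟩, by omega⟩
        have hsim := pvSim FA g i j L' (c+1) (L'.length + 5 * pvMu (pvDfs FA g i j)) hR hmu
          (by simp at hB ⊢; omega) (le_refl _)
        rw [hsim]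
        have hstepv : pvStep FA g (i, j) = pvDfs FA g i j := by
          simp [pvStep, h2]
        have hsh := pvShape_dfs FA g i j
        have hlen : (pvDfs FA g i j).length = g.length := by
          have := congrArg List.length hsh
          simpa [pvShape] using this
        have hW : ((pvDfs FA g i j).headD []).length = (g.headD []).length := by
          rw [pvW_shape, pvW_shape, hsh]
        rw [List.foldl_cons, hstepv]
        apply ih _ _ (pvRect_of_shape hsh hR) (by have := pvMu_dfs_le FA g i j; omega)
        · intro q hq
          obtain ⟨hq1, hq2, hq3, hq4, hq5⟩ := hmem q (List.mem_cons_of_mem _ hq)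
          refine ⟨hq1, by omega, hq3, by omega, ?_⟩
          rcases pvGetc_dfs_or FA g i j q.1 q.2 with he | he
          · rw [he]; exact hq5
          · right; exact he
        · exact le_refl _
      · -- an already flooded seed: both sides skip it
        have hbt : pvBad g i j = true := by
          simp [pvBad, h3]
        rw [show pvRun (c+1) g ((i, j) :: L') = pvRun c g L' by simp [pvRun, hbt]]
        rw [List.foldl_cons, show pvStep FA g (i, j) = g by simp [pvStep, h3]]
        apply ih g c hR hmu
        · intro q hq; exact hmem q (List.mem_cons_of_mem _ hq)
        · simp at hB; omega

-- dropping the pairs whose original cell is not 2 does not change A's fold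
theorem pvFold_filter (FA : Nat) (data : List (List Int)) :
    ∀ (L : List (Int × Int)) (g : List (List Int)),
    (∀ a b, pvGetc g a b = pvGetc data a b ∨ pvGetc g a b = 3) →
    L.foldl (pvStep FA) g = (L.filter (fun p => pvGetc data p.1 p.2 == 2)).foldl (pvStep FA) g := by
  intro L
  induction L with
  | nil => intro g _; rfl
  | cons p L' ih =>
    intro g hP
    by_cases h0 : pvGetc data p.1 p.2 == 2
    · have hf : List.filter (fun q => pvGetc data q.1 q.2 == 2) (p :: L')
          = p :: List.filter (fun q => pvGetc data q.1 q.2 == 2) L' := by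
        simp only [List.filter_cons, h0, if_true]
      rw [hf, List.foldl_cons, List.foldl_cons]
      apply ih
      intro a b
      unfold pvStep
      split
      · rcases pvGetc_dfs_or FA g p.1 p.2 a b with he | he
        · rw [he]; exact hP a b
        · right; exact he
      · exact hP a b
    · have hf : List.filter (fun q => pvGetc data q.1 q.2 == 2) (p :: L')
          = List.filter (fun q => pvGetc data q.1 q.2 == 2) L' := by
        simp only [List.filter_cons, h0, Bool.false_eq_true, if_false]
      rw [hf, List.foldl_cons]
      have hstep : pvStep FA g p = g := by
        unfold pvStep
        rcases hP p.1 p.2 with he | he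
        · simp [he, h0]
        · simp [he]
      rw [hstep]
      exact ih g hP

theorem pvCount_flatten (g : List (List Int)) :
    (g.flatten.count 0 : Int) = (g.map (fun r => (r.count 0 : Int))).sum := by
  induction g with
  | nil => rfl
  | cons r t ih =>
    simp only [List.flatten_cons, List.count_append, List.map_cons, List.sum_cons, ← ih]
    push_cast
    ring

theorem pvFoldl_id {α β : Type} (l : List β) (x : α) : l.foldl (fun a _ => a) x = x := by
  induction l generalizing x with
  | nil => rfl
  | cons b t ih => exact ih x

-- the main equivalence, assembled from the simulation and seed lemmas
theorem search_eq_alt (n m : Int) (data : List (List Int)) (hPre : Pre_search n m data) :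
    search n m data = search_alt n m data := by
  unfold search search_alt
  dsimp only
  by_cases hn : n ≤ 0
  · rw [PySem.List.pyRange_one_eq_nil (a := 0) (b := n) (by omega)]
    simp only [List.foldl_nil, List.length_nil, pvRun_nil]
    exact pvCount_flatten data
  · by_cases hm : m ≤ 0
    · rw [PySem.List.pyRange_one_eq_nil (a := 0) (b := m) (by omega)]
      simp only [List.foldl_nil, pvFoldl_id, List.length_nil, pvRun_nil]
      exact pvCount_flatten data
    · rcases hPre with h | ⟨hnR, hmW, hrect⟩
      · omega
      · have hRect : pvRect data := by
          intro x hx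
          obtain ⟨r, hr, rfl⟩ := List.mem_map.mp hx
          rw [← pvW_shape]
          exact hrect r hr
        have hmu : pvMu data ≤ data.length * (data.headD []).length := by
          have hb : ∀ x ∈ data.map (fun r => r.countP pvMark), x ≤ (data.headD []).length := by
            intro x hx
            obtain ⟨r, hr, rfl⟩ := List.mem_map.mp hx
            exact le_trans (List.countP_le_length ..) (le_of_eq (hrect r hr))
          have := List.sum_le_card_nsmul (data.map (fun r => r.countP pvMark)) _ hb
          simpa [pvMu] using this
        set FA := data.length * (data.headD []).length + 1 with hFA
        set allP := (PySem.List.pyRange 0 n 1).flatMap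
            (fun i => (PySem.List.pyRange 0 m 1).map (fun j => (i, j))) with hallP
        set seeds := allP.filter (fun p => pvGetc data p.1 p.2 == 2) with hseedsdef
        -- A's nested loops are a fold of pvStep over all scanned pairs
        have hA : (PySem.List.pyRange 0 n 1).foldl (fun g i =>
              (PySem.List.pyRange 0 m 1).foldl (fun g j =>
                if pvGetc g i j == 2 then pvDfs FA g i j else g) g) data
            = allP.foldl (pvStep FA) data := by
          rw [hallP, List.foldl_flatMap]
          congr 1
          funext x i
          rw [List.foldl_map]
          rfl
        -- B's seed comprehension is the filtered pair list
        have hseeds : (PySem.List.pyRange 0 n 1).foldl (fun acc i =>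
              (PySem.List.pyRange 0 m 1).foldl (fun acc j =>
                if pvGetc data i j == 2 then acc ++ [(i, j)] else acc) acc) ([] : List (Int × Int))
            = seeds := by
          have h1 : (fun (acc : List (Int × Int)) (i : Int) =>
                (PySem.List.pyRange 0 m 1).foldl (fun acc j =>
                  if pvGetc data i j == 2 then acc ++ [(i, j)] else acc) acc)
              = fun acc i => acc ++ ((PySem.List.pyRange 0 m 1).filter
                  (fun j => pvGetc data i j == 2)).map (fun j => (i, j)) := by
            funext acc i
            exact PySem.List.foldl_append_if _ _ _ _
          rw [h1, PySem.List.foldl_append_eq_flatMap, List.nil_append, hseedsdef, hallP,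
            List.filter_flatMap]
          congr 1
          funext i
          rw [List.filter_map]
          rfl
        rw [hA, hseeds]
        have hmem : ∀ p ∈ seeds, 0 ≤ p.1 ∧ p.1 < (data.length : Int) ∧ 0 ≤ p.2 ∧
            p.2 < ((data.headD []).length : Int) ∧
            (pvGetc data p.1 p.2 = 2 ∨ pvGetc data p.1 p.2 = 3) := by
          intro p hp
          rw [hseedsdef, List.mem_filter] at hp
          obtain ⟨hpAll, hp2⟩ := hp
          rw [hallP, List.mem_flatMap] at hpAll
          obtain ⟨i, hi, hpm⟩ := hpAll
          obtain ⟨j, hj, rfl⟩ := List.mem_map.mp hpm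
          rw [PySem.List.mem_pyRange_one] at hi hj
          simp only [beq_iff_eq] at hp2
          exact ⟨by omega, by omega, by omega, by omega, Or.inl hp2⟩
        rw [pvRun_seeds FA seeds data _ hRect (by omega) hmem (by omega)]
        rw [pvFold_filter FA data allP data (fun a b => Or.inl rfl), ← hseedsdef]
        exact pvCount_flatten _

-- ===== VERDICT (by name: the statement is the Claim_ definition above) =====
theorem search_spec : Claim_equal_search := by
  unfold Claim_equal_search
  intro n m data _ hPre
  unfold Spec_search
  exact search_eq_alt n m data hPre
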